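-- pv_equiv track=rewrite | github.com/MinhCreator/python_dev | python/solve_work/flower.py | flower
-- ===== SOURCE A (Python) =====
-- def flower(number: int, lst: list[int]) -> int :
--
--     n = number
--     long_lst = 0
--     lst = [0] + lst
--     for i in range(1, n - 1):
--
--         for j in range(i + 2, n):
--                 if lst[j] != lst[j - 1] or lst[j] != lst[j - 2]:
--                     long_lst = max(long_lst, j - i + 1)
--
--     return long_lst
-- ===== SOURCE B (Python) =====
-- def flower(number: int, lst: list[int]) -> int:
--     # The A-loop's value j - i + 1 is maximal at i = 1, where it equals j;
--     # so the answer is the largest j in [3, number-1] whose condition holds.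
--     a = [0] + lst
--     for j in range(number - 1, 2, -1):
--         if a[j] != a[j - 1] or a[j] != a[j - 2]:
--             return j
--     return 0
-- ===== Notes on version B (the rewrite author's own statement) =====
-- stated objective: faster
-- what changed: A's inner condition depends only on j, and j - i + 1 is maximal at i = 1 where it equals j, so B replaces the nested loops by one downward scan returning the first (= largest) j in [3, number-1] whose condition holds.
import Mathlib
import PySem

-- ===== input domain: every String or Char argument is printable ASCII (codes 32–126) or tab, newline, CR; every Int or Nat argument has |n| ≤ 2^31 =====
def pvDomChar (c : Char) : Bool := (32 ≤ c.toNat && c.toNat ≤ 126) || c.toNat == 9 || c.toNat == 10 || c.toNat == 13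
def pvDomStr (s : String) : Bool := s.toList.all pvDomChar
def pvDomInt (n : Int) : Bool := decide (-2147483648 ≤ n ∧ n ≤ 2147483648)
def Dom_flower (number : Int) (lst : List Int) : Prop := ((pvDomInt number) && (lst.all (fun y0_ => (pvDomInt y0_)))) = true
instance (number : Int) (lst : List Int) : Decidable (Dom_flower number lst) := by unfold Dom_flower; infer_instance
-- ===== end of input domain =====

-- B replaces A's quadratic double loop by a single downward scan for the largest
-- valid j (the loop value j - i + 1 is maximal at i = 1, where it equals j).

-- ===== PORT A =====
-- the if-condition `lst[j] != lst[j-1] or lst[j] != lst[j-2]` (identical in A and B)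
def flowerCond (a : List Int) (j : Int) : Bool :=
  (PySem.List.pyGetD a j 0 != PySem.List.pyGetD a (j - 1) 0) ||
  (PySem.List.pyGetD a j 0 != PySem.List.pyGetD a (j - 2) 0)

def flower (number : Int) (lst : List Int) : Int :=
  (PySem.List.pyRange 1 (number - 1) 1).foldl
    (fun long i =>
      (PySem.List.pyRange (i + 2) number 1).foldl
        (fun long j => if flowerCond (0 :: lst) j then max long (j - i + 1) else long)
        long)
    0

-- ===== PORT B =====
-- B's for-loop with early `return j`: first j in the countdown whose condition holds
def flowerScan (a : List Int) : List Int → Int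
  | [] => 0
  | j :: rest => if flowerCond a j then j else flowerScan a rest

def flower_alt (number : Int) (lst : List Int) : Int :=
  flowerScan (0 :: lst) (PySem.List.pyRange (number - 1) 2 (-1))

-- ===== PRECONDITION & SPEC =====
-- Pre_ excludes exactly the inputs where Python raises IndexError (both A and B do,
-- at the same first access lst[number-1] of the padded list): number ≥ 4 with number > len(lst)+1.
def Pre_flower (number : Int) (lst : List Int) : Prop :=
  number ≤ 3 ∨ number ≤ (lst.length : Int) + 1
instance (number : Int) (lst : List Int) : Decidable (Pre_flower number lst) := by
  unfold Pre_flower; infer_instance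

def pvWitness_flower : Int × List Int := (5, [1, 2, 3, 1])

def Spec_flower (number : Int) (lst : List Int) (out : Int) : Prop := out = flower_alt number lst
instance (number : Int) (lst : List Int) (out : Int) : Decidable (Spec_flower number lst out) := by
  unfold Spec_flower; infer_instance

-- ===== CLAIM (what is proved, stated in full; the proofs are below) =====
def Claim_equal_flower : Prop := ∀ (number : Int) (lst : List Int), Dom_flower number lst → Pre_flower number lst → Spec_flower number lst (flower number lst)

-- ===== LEMMAS AND PROOFS =====

-- the inner-loop body of A at outer index i
def stepA (a : List Int) (i long j : Int) : Int :=
  if flowerCond a j then max long (j - i + 1) else long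

-- the same body at i = 1, with j - 1 + 1 simplified to j
def step1 (a : List Int) (long j : Int) : Int :=
  if flowerCond a j then max long j else long

theorem stepA_shift (a : List Int) (i : Int) (L : List Int) (x acc : Int) :
    L.foldl (stepA a i) (max x acc) = max x (L.foldl (stepA a i) acc) := by
  induction L generalizing acc with
  | nil => simp
  | cons j rest ih =>
    simp only [List.foldl_cons, stepA]
    by_cases h : flowerCond a j
    · simp only [h, if_pos]
      rw [max_assoc]
      exact ih _
    · simp only [h, if_neg, Bool.false_eq_true, not_false_iff]
      exact ih acc

theorem stepA_ub (a : List Int) (i : Int) (L : List Int) (acc M : Int)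
    (hacc : acc ≤ M) (hL : ∀ j ∈ L, flowerCond a j = true → j - i + 1 ≤ M) :
    L.foldl (stepA a i) acc ≤ M := by
  induction L generalizing acc with
  | nil => simpa using hacc
  | cons j rest ih =>
    simp only [List.foldl_cons]
    refine ih _ ?_ (fun k hk => hL k (List.mem_cons_of_mem _ hk))
    unfold stepA
    by_cases h : flowerCond a j
    · simp only [h, if_pos]
      exact max_le hacc (hL j List.mem_cons_self h)
    · simpa [h] using hacc

theorem stepA_ge (a : List Int) (i : Int) (L : List Int) (acc : Int) :
    acc ≤ L.foldl (stepA a i) acc := by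
  induction L generalizing acc with
  | nil => simp
  | cons j rest ih =>
    simp only [List.foldl_cons]
    refine le_trans ?_ (ih (stepA a i acc j))
    unfold stepA
    by_cases h : flowerCond a j <;> simp [h]

theorem stepA_hit (a : List Int) (i : Int) (L : List Int) (acc j : Int)
    (hj : j ∈ L) (hc : flowerCond a j = true) :
    j - i + 1 ≤ L.foldl (stepA a i) acc := by
  induction L generalizing acc with
  | nil => cases hj
  | cons x rest ih =>
    simp only [List.foldl_cons]
    rcases List.mem_cons.mp hj with h | h
    · subst h
      refine le_trans ?_ (stepA_ge a i rest _)
      simp [stepA, hc]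
    · exact ih _ h

theorem outer_const (a : List Int) (n : Int) (I : List Int) (acc : Int)
    (h0 : 0 ≤ acc)
    (hI : ∀ i ∈ I, (PySem.List.pyRange (i + 2) n 1).foldl (stepA a i) 0 ≤ acc) :
    I.foldl (fun long i => (PySem.List.pyRange (i + 2) n 1).foldl (stepA a i) long) acc = acc := by
  induction I with
  | nil => rfl
  | cons i rest ih =>
    simp only [List.foldl_cons]
    have h1 : (PySem.List.pyRange (i + 2) n 1).foldl (stepA a i) acc = acc := by
      have := stepA_shift a i (PySem.List.pyRange (i + 2) n 1) acc 0
      rw [max_eq_left h0] at this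
      rw [this, max_eq_left (hI i List.mem_cons_self)]
    rw [h1]
    exact ih (fun k hk => hI k (List.mem_cons_of_mem _ hk))

theorem inner_le_inner1 (a : List Int) (n i : Int) (hi : 2 ≤ i) :
    (PySem.List.pyRange (i + 2) n 1).foldl (stepA a i) 0 ≤
      (PySem.List.pyRange 3 n 1).foldl (stepA a 1) 0 := by
  refine stepA_ub a i _ 0 _ (stepA_ge a 1 _ 0) ?_
  intro j hj hc
  have hmem := (PySem.List.mem_pyRange_one).mp hj
  have hj' : j ∈ PySem.List.pyRange 3 n 1 := by
    rw [PySem.List.mem_pyRange_one]; omega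
  have := stepA_hit a 1 (PySem.List.pyRange 3 n 1) 0 j hj' hc
  omega

theorem stepA_one_eq_step1 (a : List Int) : stepA a 1 = step1 a := by
  funext long j
  unfold stepA step1
  rw [show j - 1 + 1 = j by ring]

theorem flower_eq_fold (number : Int) (lst : List Int) (h3 : 3 ≤ number) :
    flower number lst = (PySem.List.pyRange 3 number 1).foldl (step1 (0 :: lst)) 0 := by
  unfold flower
  rw [PySem.List.pyRange_one_cons (by omega : (1:Int) < number - 1)]
  simp only [List.foldl_cons]
  have he : (fun long j => if flowerCond (0 :: lst) j then max long (j - 1 + 1) else long)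
      = stepA (0 :: lst) 1 := rfl
  rw [show (1:Int) + 2 = 3 by norm_num, he]
  have hcongr : ∀ (L : List Int) (acc : Int),
      L.foldl (fun long i => (PySem.List.pyRange (i + 2) number 1).foldl
        (fun long j => if flowerCond (0 :: lst) j then max long (j - i + 1) else long) long) acc
      = L.foldl (fun long i => (PySem.List.pyRange (i + 2) number 1).foldl
        (stepA (0 :: lst) i) long) acc := by
    intro L acc; rfl
  rw [hcongr]
  rw [outer_const (0 :: lst) number _ _ (stepA_ge _ 1 _ 0) ?_]
  · rw [stepA_one_eq_step1]
  · intro i hi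
    have := (PySem.List.mem_pyRange_one).mp hi
    exact inner_le_inner1 (0 :: lst) number i (by omega)

-- B-side: step1 is a max-fold, hence order-insensitive
theorem step1_swap (a : List Int) (b x y : Int) :
    step1 a (step1 a b x) y = step1 a (step1 a b y) x := by
  unfold step1
  by_cases hx : flowerCond a x <;> by_cases hy : flowerCond a y <;>
    simp [hx, hy, max_right_comm]

theorem step1_bubble (a : List Int) (L : List Int) (b x : Int) :
    L.foldl (step1 a) (step1 a b x) = step1 a (L.foldl (step1 a) b) x := by
  induction L generalizing b with
  | nil => rfl
  | cons y rest ih =>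
    simp only [List.foldl_cons]
    rw [step1_swap, ih]

theorem fold1_reverse (a : List Int) (L : List Int) (acc : Int) :
    L.reverse.foldl (step1 a) acc = L.foldl (step1 a) acc := by
  induction L generalizing acc with
  | nil => rfl
  | cons x rest ih =>
    simp only [List.reverse_cons, List.foldl_append, List.foldl_cons, List.foldl_nil]
    rw [ih, ← step1_bubble]

theorem fold1_shift (a : List Int) (L : List Int) (x acc : Int) :
    L.foldl (step1 a) (max x acc) = max x (L.foldl (step1 a) acc) := by
  have h : ∀ (long j : Int), step1 a long j = stepA a 1 long j := by
    intro long j; rw [stepA_one_eq_step1]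
  simp only [funext fun long => funext fun j => h long j]
  exact stepA_shift a 1 L x acc

theorem fold1_ub (a : List Int) (L : List Int) (acc M : Int)
    (hacc : acc ≤ M) (hL : ∀ j ∈ L, j ≤ M) :
    L.foldl (step1 a) acc ≤ M := by
  induction L generalizing acc with
  | nil => simpa using hacc
  | cons j rest ih =>
    simp only [List.foldl_cons]
    refine ih _ ?_ (fun k hk => hL k (List.mem_cons_of_mem _ hk))
    unfold step1
    by_cases h : flowerCond a j
    · simp only [h, if_pos]
      exact max_le hacc (hL j List.mem_cons_self)
    · simpa [h] using hacc

theorem scan_desc (a : List Int) (D : List Int)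
    (hpos : ∀ j ∈ D, 0 < j) (hsort : D.Pairwise (· > ·)) :
    flowerScan a D = D.foldl (step1 a) 0 := by
  induction D with
  | nil => rfl
  | cons j rest ih =>
    rcases List.pairwise_cons.mp hsort with ⟨hgt, hrest⟩
    simp only [flowerScan, List.foldl_cons]
    by_cases h : flowerCond a j
    · have hj : 0 < j := hpos j List.mem_cons_self
      have h0 : step1 a 0 j = j := by
        simp [step1, h, max_eq_right (le_of_lt hj)]
      rw [h, if_pos rfl, h0]
      have hub : rest.foldl (step1 a) 0 ≤ j :=
        fold1_ub a rest 0 j (le_of_lt hj) (fun k hk => le_of_lt (hgt k hk))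
      calc j = max j (rest.foldl (step1 a) 0) := (max_eq_left hub).symm
        _ = rest.foldl (step1 a) (max j 0) := (fold1_shift a rest j 0).symm
        _ = rest.foldl (step1 a) j := by rw [max_eq_left (le_of_lt hj)]
    · have h0 : step1 a 0 j = 0 := by simp [step1, h]
      simp only [h, Bool.false_eq_true, if_false, h0]
      exact ih (fun k hk => hpos k (List.mem_cons_of_mem _ hk)) hrest

theorem flower_alt_eq_fold (number : Int) (lst : List Int) (_h3 : 3 ≤ number) :
    flower_alt number lst = (PySem.List.pyRange 3 number 1).foldl (step1 (0 :: lst)) 0 := by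
  unfold flower_alt
  rw [PySem.List.pyRange_neg_one_eq_reverse]
  rw [show (2:Int) + 1 = 3 by norm_num, show number - 1 + 1 = number by ring]
  rw [scan_desc (0 :: lst) _ ?_ ?_]
  · exact fold1_reverse _ _ 0
  · intro j hj
    have := (PySem.List.mem_pyRange_one).mp (List.mem_reverse.mp hj)
    omega
  · rw [List.pairwise_reverse]
    exact PySem.List.pairwise_lt_pyRange_one 3 number

-- ===== VERDICT (by name: the statement is the Claim_ definition above) =====
theorem flower_spec : Claim_equal_flower := by
  intro number lst _ _
  unfold Spec_flower
  by_cases h3 : 3 ≤ number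
  · rw [flower_eq_fold number lst h3, flower_alt_eq_fold number lst h3]
  · unfold flower flower_alt
    rw [PySem.List.pyRange_one_eq_nil (by omega : number - 1 ≤ 1),
        PySem.List.pyRange_neg_one_eq_nil (by omega : number - 1 ≤ 2)]
    rfl
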